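-- pv_equiv track=rewrite | github.com/p0s/the-mind | scripts/fetch_transcripts.py | ccc_pick_track
-- ===== SOURCE A (Python) =====
-- from typing import Any, Dict, Iterable, List, Optional, Tuple
--
-- def _filter_lang_keys(keys: Iterable[str]) -> List[str]:
--     out = []
--     for k in keys:
--         kl = k.lower()
--         if kl in {"live_chat"}:
--             continue
--         out.append(k)
--     return out
--
-- def _best_lang_for_prefix(keys: List[str], prefix: str) -> Optional[str]:
--     """Pick the "best" language code for a prefix (en/de)."""
--     prefix_l = prefix.lower()
--     keys_l = {k.lower(): k for k in keys}  # preserve original casing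
--
--     # Exact match first.
--     if prefix_l in keys_l:
--         return keys_l[prefix_l]
--
--     # Common variants, shortest first (e.g., en-US over en-US-x-...).
--     variants = [k for k in keys if k.lower().startswith(prefix_l + "-")]
--     if variants:
--         return sorted(variants, key=lambda s: (len(s), s.lower()))[0]
--
--     # Any remaining startswith, e.g. "en_or" unlikely but keep it.
--     any_pref = [k for k in keys if k.lower().startswith(prefix_l)]
--     if any_pref:
--         return sorted(any_pref, key=lambda s: (len(s), s.lower()))[0]
--     return None
--
-- def ccc_pick_track(tracks: List[Tuple[str, str]]) -> Tuple[Optional[str], Optional[str]]: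
--     # tracks: [(lang, url)]
--     langs = [t[0] for t in tracks]
--     langs = _filter_lang_keys(langs)
--
--     def find_lang(prefix: str) -> Optional[str]:
--         return _best_lang_for_prefix(langs, prefix)
--
--     for group in ("en", "de"):
--         l = find_lang(group)
--         if l:
--             for lang, src in tracks:
--                 if lang == l:
--                     return group, src
--
--     if tracks:
--         # Prefer a non-empty srclang.
--         tracks_sorted = sorted(tracks, key=lambda t: (t[0] == "", t[0].lower(), t[1]))
--         return "other", tracks_sorted[0][1]
--     return None, None
-- ===== SOURCE B (Python) =====
-- from typing import List, Optional, Tuple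
--
-- def _scan_best(langs: List[str], group: str) -> Optional[str]:
--     """One pass over langs keeping the best candidate per tier:
--     exact lowercase match (last occurrence wins, like a dict rebuild),
--     then shortest 'group-' variant, then shortest other prefix match."""
--     dash = group + "-"
--     exact = None
--     variant = None
--     other = None
--     for k in langs:
--         kl = k.lower()
--         if kl == group:
--             exact = k
--         elif kl.startswith(dash):
--             if variant is None or (len(k), kl) < (len(variant), variant.lower()):
--                 variant = k
--         elif kl.startswith(group):
--             if other is None or (len(k), kl) < (len(other), other.lower()):
--                 other = k
--     if exact is not None:
--         return exact
--     if variant is not None: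
--         return variant
--     return other
--
-- def ccc_pick_track(tracks: List[Tuple[str, str]]) -> Tuple[Optional[str], Optional[str]]:
--     langs = [lang for lang, _ in tracks if lang.lower() != "live_chat"]
--     for group in ("en", "de"):
--         l = _scan_best(langs, group)
--         if l is not None:
--             for lang, src in tracks:
--                 if lang == l:
--                     return group, src
--     if tracks:
--         t = min(tracks, key=lambda t: (t[0] == "", t[0].lower(), t[1]))
--         return "other", t[1]
--     return None, None
-- ===== Notes on version B (the rewrite author's own statement) =====
-- stated objective: simpler
-- what changed: Replaces A's rebuild-a-lowercase-dict plus three separate filter-and-sort passes per language prefix by a single linear scan over the language list that keeps three running slots (last exact lowercase match, running minimum by (len, lower) for 'prefix-' variants, and for other prefix matches), and replaces the fallback sort-then-take-first by min(tracks, key=...).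
import Mathlib
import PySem

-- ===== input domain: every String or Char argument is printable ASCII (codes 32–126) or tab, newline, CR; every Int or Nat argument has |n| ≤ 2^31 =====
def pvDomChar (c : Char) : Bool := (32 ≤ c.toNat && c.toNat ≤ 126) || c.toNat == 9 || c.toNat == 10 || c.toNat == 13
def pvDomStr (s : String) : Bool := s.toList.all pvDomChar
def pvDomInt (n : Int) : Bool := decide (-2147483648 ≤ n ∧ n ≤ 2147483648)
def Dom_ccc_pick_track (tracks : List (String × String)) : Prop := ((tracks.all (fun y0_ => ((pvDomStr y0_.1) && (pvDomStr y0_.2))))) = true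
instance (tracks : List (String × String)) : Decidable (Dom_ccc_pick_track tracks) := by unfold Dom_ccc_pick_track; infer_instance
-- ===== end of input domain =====

-- B replaces A's dict rebuild plus three filter-and-sort passes by one linear scan keeping
-- the best candidate per tier (simpler: no sorting, no dict); return values are identical.

-- ===== PORT A =====

-- _filter_lang_keys: loop appending every key whose lowercase is not "live_chat"
def pvFilterLangKeys (keys : List String) : List String :=
  keys.foldl (fun out k => if PySem.Str.lower k == "live_chat" then out else out ++ [k]) []

-- _best_lang_for_prefix: dict of lowercased keys (last wins), then variants sort, then any-prefix sort.
-- Python's tuple key (len(s), s.lower()) is the lexicographic pair, ported as toLex.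
def pvBestLang (keys : List String) (pfx : String) : Option String :=
  let prefixL := PySem.Str.lower pfx
  let keysL := keys.foldl (fun d k => d.insert (PySem.Str.lower k) k) (PySem.Dict.empty : PySem.Dict String String)
  match keysL.get? prefixL with
  | some v => some v
  | none =>
    let variants := keys.filter (fun k => PySem.Str.startswith (PySem.Str.lower k) (prefixL ++ "-"))
    if variants ≠ [] then
      -- sorted(variants, key=...)[0]; the guard makes the list non-empty, so head? is the [0] element
      (PySem.List.sorted variants (fun s => toLex (PySem.Str.len s, PySem.Str.lower s)) false).head?
    else
      let anyPref := keys.filter (fun k => PySem.Str.startswith (PySem.Str.lower k) prefixL)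
      if anyPref ≠ [] then
        (PySem.List.sorted anyPref (fun s => toLex (PySem.Str.len s, PySem.Str.lower s)) false).head?
      else none

-- body of the 'for group in ("en","de")' loop: find_lang, truthiness test, inner scan of tracks
def pvTryGroup (tracks : List (String × String)) (langs : List String) (group : String) :
    Option (Option String × Option String) :=
  match pvBestLang langs group with
  | some l =>
    if l ≠ "" then
      match tracks.find? (fun t => t.1 == l) with
      | some t => some (some group, some t.2)
      | none => none
    else none
  | none => none

def ccc_pick_track (tracks : List (String × String)) : Option String × Option String :=
  let langs := pvFilterLangKeys (tracks.map (fun t => t.1))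
  let res := (["en", "de"]).foldl (fun acc group =>
    match acc with
    | some r => some r
    | none => pvTryGroup tracks langs group) none
  match res with
  | some r => r
  | none =>
    if tracks ≠ [] then
      -- tracks_sorted = sorted(tracks, key=lambda t: (t[0]=="", t[0].lower(), t[1])); return "other", tracks_sorted[0][1]
      match PySem.List.sorted tracks
          (fun t => toLex (decide (t.1 = ""), toLex (PySem.Str.lower t.1, t.2))) false with
      | t :: _ => (some "other", some t.2)
      | [] => (none, none)   -- unreachable: sorted of a non-empty list is non-empty
    else (none, none)

-- ===== PORT B =====

-- _scan_best: one pass, three running slots (last exact match; strict running minimum by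
-- (len, lower) for 'group-' variants and for other prefix matches)
def pvScanBest (langs : List String) (group : String) : Option String :=
  let dash := group ++ "-"
  let r := langs.foldl (fun s k =>
      let kl := PySem.Str.lower k
      if kl == group then (some k, s.2.1, s.2.2)
      else if PySem.Str.startswith kl dash then
        (s.1,
         (match s.2.1 with
          | none => some k
          | some v => if toLex (PySem.Str.len k, kl) < toLex (PySem.Str.len v, PySem.Str.lower v)
                      then some k else some v),
         s.2.2)
      else if PySem.Str.startswith kl group then
        (s.1, s.2.1,
         (match s.2.2 with
          | none => some k
          | some v => if toLex (PySem.Str.len k, kl) < toLex (PySem.Str.len v, PySem.Str.lower v)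
                      then some k else some v))
      else s) ((none, none, none) : Option String × Option String × Option String)
  match r.1 with
  | some e => some e
  | none =>
    match r.2.1 with
    | some v => some v
    | none => r.2.2

def pvTryGroupB (tracks : List (String × String)) (langs : List String) (group : String) :
    Option (Option String × Option String) :=
  match pvScanBest langs group with
  | some l =>
    match tracks.find? (fun t => t.1 == l) with
    | some t => some (some group, some t.2)
    | none => none
  | none => none

def ccc_pick_track_alt (tracks : List (String × String)) : Option String × Option String :=
  let langs := tracks.filterMap (fun t => if PySem.Str.lower t.1 == "live_chat" then none else some t.1)
  let res := (["en", "de"]).foldl (fun acc group =>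
    match acc with
    | some r => some r
    | none => pvTryGroupB tracks langs group) none
  match res with
  | some r => r
  | none =>
    -- min(tracks, key=lambda t: (t[0]=="", t[0].lower(), t[1])) under the non-emptiness guard
    match PySem.List.min? tracks
        (fun t => toLex (decide (t.1 = ""), toLex (PySem.Str.lower t.1, t.2))) with
    | some t => (some "other", some t.2)
    | none => (none, none)

-- ===== PRECONDITION & SPEC =====
def Spec_ccc_pick_track (tracks : List (String × String)) (out : Option String × Option String) : Prop := out = ccc_pick_track_alt tracks
instance (tracks : List (String × String)) (out : Option String × Option String) : Decidable (Spec_ccc_pick_track tracks out) := by unfold Spec_ccc_pick_track; infer_instance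

-- ===== CLAIM (what is proved, stated in full; the proofs are below) =====
def Claim_equal_ccc_pick_track : Prop := ∀ (tracks : List (String × String)), Dom_ccc_pick_track tracks → Spec_ccc_pick_track tracks (ccc_pick_track tracks)

-- ===== LEMMAS AND PROOFS =====

-- the three independent per-slot step functions of B's scan
def pvEStep (g : String) (e : Option String) (k : String) : Option String :=
  if PySem.Str.lower k == g then some k else e

def pvMinStep (a : Option String) (k : String) : Option String :=
  match a with
  | none => some k
  | some v => if toLex (PySem.Str.len k, PySem.Str.lower k) < toLex (PySem.Str.len v, PySem.Str.lower v)
              then some k else some v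

def pvVStep (g : String) (a : Option String) (k : String) : Option String :=
  if PySem.Str.lower k == g then a
  else if PySem.Str.startswith (PySem.Str.lower k) (g ++ "-") then pvMinStep a k
  else a

def pvOStep (g : String) (a : Option String) (k : String) : Option String :=
  if PySem.Str.lower k == g then a
  else if PySem.Str.startswith (PySem.Str.lower k) (g ++ "-") then a
  else if PySem.Str.startswith (PySem.Str.lower k) g then pvMinStep a k
  else a

theorem pv_startswith_length {s p : String} (h : PySem.Str.startswith s p = true) :
    p.toList.length ≤ s.toList.length := by
  have : PySem.Chars.startswith s.toList p.toList = true := by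
    simpa [PySem.Str.startswith] using h
  exact ((PySem.Chars.startswith_iff _ _).1 this).length_le

theorem pv_not_startswith_dash {k g : String} (h : PySem.Str.lower k = g) :
    PySem.Str.startswith (PySem.Str.lower k) (g ++ "-") = false := by
  rw [h]
  by_contra hc
  have hb : PySem.Str.startswith g (g ++ "-") = true := by
    cases hx : PySem.Str.startswith g (g ++ "-") with
    | false => exact absurd hx hc
    | true => rfl
  have := pv_startswith_length hb
  simp [String.toList_append] at this

-- the dict of lowercased keys, looked up at p, is the "last exact match" left fold
theorem pv_dict_lastE (l : List String) (d : PySem.Dict String String) (p : String) :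
    (l.foldl (fun d k => d.insert (PySem.Str.lower k) k) d).get? p
      = l.foldl (fun a k => if PySem.Str.lower k == p then some k else a) (d.get? p) := by
  induction l generalizing d with
  | nil => rfl
  | cons h t ih =>
    simp only [List.foldl_cons]
    rw [ih]
    congr 1
    by_cases he : PySem.Str.lower h = p
    · simp [he, PySem.Dict.get?_insert_self]
    · simp [he, PySem.Dict.get?_insert_of_ne _ _ (Ne.symm he)]

-- head of a stable insertion sort = Python's min (first minimum)
theorem pv_insertBy_head {α κ : Type} [LinearOrder κ] (key : α → κ) (x : α) (acc : List α) :
    (PySem.List.insertBy (fun a b => decide (key a < key b)) x acc).head?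
      = (match acc.head? with
         | none => some x
         | some m => if key x < key m then some x else some m) := by
  cases acc with
  | nil => simp [PySem.List.insertBy]
  | cons y ys =>
    by_cases h : key x < key y <;> simp [PySem.List.insertBy, h]

theorem pv_sorted_head_min {α κ : Type} [LinearOrder κ] (xs : List α) (key : α → κ) :
    (PySem.List.sorted xs key false).head? = PySem.List.min? xs key := by
  rw [PySem.List.sorted_eq_foldl_insertBy]
  unfold PySem.List.min?
  suffices h : ∀ (l : List α) (acc : List α),
      (l.foldl (fun acc x => PySem.List.insertBy (fun a b => decide (key a < key b)) x acc) acc).head?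
        = l.foldl (fun acc x =>
            match acc with
            | none => some x
            | some m => if key x < key m then some x else some m) acc.head? by
    simpa using h xs []
  intro l
  induction l with
  | nil => intro acc; rfl
  | cons x t ih =>
    intro acc
    simp only [List.foldl_cons]
    rw [ih, pv_insertBy_head]

-- eStep facts
theorem pv_eStep_some (g : String) (l : List String) :
    ∀ (a : Option String) (v : String), l.foldl (pvEStep g) a = some v →
      (PySem.Str.lower v == g) = true ∨ a = some v := by
  induction l with
  | nil => intro a v h; right; exact h
  | cons k t ih =>
    intro a v h
    simp only [List.foldl_cons] at h
    rcases ih _ _ h with hv | hstep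
    · exact Or.inl hv
    · unfold pvEStep at hstep
      by_cases hk : (PySem.Str.lower k == g) = true
      · rw [if_pos hk] at hstep
        cases hstep
        exact Or.inl hk
      · rw [if_neg hk] at hstep
        exact Or.inr hstep

theorem pv_eStep_none (g : String) (l : List String) :
    ∀ (a : Option String), l.foldl (pvEStep g) a = none →
      a = none ∧ ∀ k ∈ l, (PySem.Str.lower k == g) = false := by
  induction l with
  | nil => intro a h; exact ⟨h, by simp⟩
  | cons k t ih =>
    intro a h
    simp only [List.foldl_cons] at h
    rcases ih _ h with ⟨hstep, hall⟩
    unfold pvEStep at hstep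
    by_cases hk : (PySem.Str.lower k == g) = true
    · rw [if_pos hk] at hstep; cases hstep
    · rw [if_neg hk] at hstep
      refine ⟨hstep, ?_⟩
      intro x hx
      rcases List.mem_cons.1 hx with hx | hx
      · subst hx; exact Bool.eq_false_iff.2 hk
      · exact hall x hx

-- vStep fold = min? over the variants filter
theorem pv_vStep_min (g : String) (l : List String) :
    l.foldl (pvVStep g) none
      = PySem.List.min? (l.filter (fun k => PySem.Str.startswith (PySem.Str.lower k) (g ++ "-")))
          (fun s => toLex (PySem.Str.len s, PySem.Str.lower s)) := by
  unfold PySem.List.min?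
  rw [List.foldl_filter]
  apply PySem.List.foldl_congr_mem
  intro a k _
  unfold pvVStep pvMinStep
  by_cases hk : PySem.Str.lower k = g
  · have hb : (PySem.Str.lower k == g) = true := by rw [hk]; exact beq_self_eq_true g
    rw [if_pos hb, pv_not_startswith_dash hk]
    rfl
  · have hb : (PySem.Str.lower k == g) = false := by
      exact beq_eq_false_iff_ne.2 hk
    rw [hb]
    by_cases hd : PySem.Str.startswith (PySem.Str.lower k) (g ++ "-") = true
    · rw [if_neg (by simp), if_pos hd, if_pos hd]
      cases a <;> rfl
    · rw [if_neg (by simp), if_neg hd, if_neg hd]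

-- oStep fold = min? over the any-prefix filter, when no exact and no dash matches occur in l
theorem pv_oStep_min (g : String) (l : List String)
    (hne : ∀ k ∈ l, (PySem.Str.lower k == g) = false)
    (hnd : ∀ k ∈ l, PySem.Str.startswith (PySem.Str.lower k) (g ++ "-") = false) :
    l.foldl (pvOStep g) none
      = PySem.List.min? (l.filter (fun k => PySem.Str.startswith (PySem.Str.lower k) g))
          (fun s => toLex (PySem.Str.len s, PySem.Str.lower s)) := by
  unfold PySem.List.min?
  rw [List.foldl_filter]
  apply PySem.List.foldl_congr_mem
  intro a k hk
  unfold pvOStep pvMinStep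
  rw [hne k hk, hnd k hk]
  by_cases hs : PySem.Str.startswith (PySem.Str.lower k) g = true
  · rw [if_neg (by simp), if_neg (by simp), if_pos hs, if_pos hs]
    cases a <;> rfl
  · rw [if_neg (by simp), if_neg (by simp), if_neg hs, if_neg hs]

-- B's scan is the triple of the three independent slot folds
theorem pv_scan_decompose (l : List String) (g : String) :
    pvScanBest l g
      = (match l.foldl (pvEStep g) none with
         | some e => some e
         | none =>
           match l.foldl (pvVStep g) none with
           | some v => some v
           | none => l.foldl (pvOStep g) none) := by
  have hstep : (fun (s : Option String × Option String × Option String) (k : String) =>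
      let kl := PySem.Str.lower k
      if kl == g then (some k, s.2.1, s.2.2)
      else if PySem.Str.startswith kl (g ++ "-") then
        (s.1,
         (match s.2.1 with
          | none => some k
          | some v => if toLex (PySem.Str.len k, kl) < toLex (PySem.Str.len v, PySem.Str.lower v)
                      then some k else some v),
         s.2.2)
      else if PySem.Str.startswith kl g then
        (s.1, s.2.1,
         (match s.2.2 with
          | none => some k
          | some v => if toLex (PySem.Str.len k, kl) < toLex (PySem.Str.len v, PySem.Str.lower v)
                      then some k else some v))
      else s)
      = (fun (s : Option String × Option String × Option String) (k : String) =>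
          (pvEStep g s.1 k,
           (fun (s2 : Option String × Option String) (k : String) =>
             (pvVStep g s2.1 k, pvOStep g s2.2 k)) s.2 k)) := by
    funext s k
    by_cases h1 : (PySem.Str.lower k == g) = true
    · simp only [pvEStep, pvVStep, pvOStep, pvMinStep, h1, if_true,
        pv_not_startswith_dash (eq_of_beq h1), Bool.false_eq_true, if_false]
    · have h1' : (PySem.Str.lower k == g) = false := Bool.eq_false_iff.2 h1
      by_cases h2 : PySem.Str.startswith (PySem.Str.lower k) (g ++ "-") = true
      · simp only [pvEStep, pvVStep, pvOStep, pvMinStep, h1', h2, Bool.false_eq_true,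
          if_false, if_true]
      · have h2' : PySem.Str.startswith (PySem.Str.lower k) (g ++ "-") = false :=
          Bool.eq_false_iff.2 h2
        by_cases h3 : PySem.Str.startswith (PySem.Str.lower k) g = true
        · simp only [pvEStep, pvVStep, pvOStep, pvMinStep, h1', h2', h3, Bool.false_eq_true,
            if_false, if_true]
        · have h3' : PySem.Str.startswith (PySem.Str.lower k) g = false :=
            Bool.eq_false_iff.2 h3
          simp only [pvEStep, pvVStep, pvOStep, pvMinStep, h1', h2', h3', Bool.false_eq_true,
            if_false]
  simp only [pvScanBest]
  rw [hstep]
  rw [PySem.List.foldl_prod_mk (pvEStep g)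
        (fun s2 k => (pvVStep g s2.1 k, pvOStep g s2.2 k)) l none (none, none),
      PySem.List.foldl_prod_mk (pvVStep g) (pvOStep g) l none none]

-- A's _best_lang_for_prefix equals B's one-pass scan (for an already-lowercase prefix)
theorem pv_bestLang_eq_scan (keys : List String) (g : String) (hg : PySem.Str.lower g = g) :
    pvBestLang keys g = pvScanBest keys g := by
  rw [pv_scan_decompose]
  simp only [pvBestLang, hg]
  rw [pv_dict_lastE]
  rw [show (PySem.Dict.empty : PySem.Dict String String).get? g = none from rfl]
  rw [show List.foldl (fun a k => if PySem.Str.lower k == g then some k else a)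
        (none : Option String) keys = List.foldl (pvEStep g) none keys from rfl]
  cases he : List.foldl (pvEStep g) none keys with
  | some e => rfl
  | none =>
    rw [pv_vStep_min]
    cases hv : PySem.List.min?
        (keys.filter (fun k => PySem.Str.startswith (PySem.Str.lower k) (g ++ "-")))
        (fun s => toLex (PySem.Str.len s, PySem.Str.lower s)) with
    | some v =>
      have hne : keys.filter (fun k => PySem.Str.startswith (PySem.Str.lower k) (g ++ "-")) ≠ [] := by
        intro h0
        rw [h0] at hv
        simp [PySem.List.min?] at hv
      rw [if_pos hne, pv_sorted_head_min, hv]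
    | none =>
      have hnil : keys.filter (fun k => PySem.Str.startswith (PySem.Str.lower k) (g ++ "-")) = [] :=
        (PySem.List.min?_eq_none_iff _ _).1 hv
      rw [if_neg (not_not_intro hnil)]
      have hnd : ∀ k ∈ keys, PySem.Str.startswith (PySem.Str.lower k) (g ++ "-") = false := by
        intro k hk
        by_contra hc
        have hmem : k ∈ keys.filter (fun k => PySem.Str.startswith (PySem.Str.lower k) (g ++ "-")) := by
          refine List.mem_filter.2 ⟨hk, ?_⟩
          cases hx : PySem.Str.startswith (PySem.Str.lower k) (g ++ "-") with
          | false => exact absurd hx hc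
          | true => rfl
        rw [hnil] at hmem
        exact absurd hmem (List.not_mem_nil)
      rw [pv_oStep_min g keys (pv_eStep_none g keys none he).2 hnd]
      cases ho : PySem.List.min?
          (keys.filter (fun k => PySem.Str.startswith (PySem.Str.lower k) g))
          (fun s => toLex (PySem.Str.len s, PySem.Str.lower s)) with
      | some o =>
        have hne2 : keys.filter (fun k => PySem.Str.startswith (PySem.Str.lower k) g) ≠ [] := by
          intro h0
          rw [h0] at ho
          simp [PySem.List.min?] at ho
        rw [if_pos hne2, pv_sorted_head_min, ho]
      | none =>
        rw [if_neg (not_not_intro ((PySem.List.min?_eq_none_iff _ _).1 ho))]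

-- a winner of B's scan always satisfies one of the three prefix conditions
theorem pv_scan_some_cond (keys : List String) (g : String) (l : String)
    (h : pvScanBest keys g = some l) :
    (PySem.Str.lower l == g) = true
    ∨ PySem.Str.startswith (PySem.Str.lower l) (g ++ "-") = true
    ∨ PySem.Str.startswith (PySem.Str.lower l) g = true := by
  rw [pv_scan_decompose] at h
  cases he : keys.foldl (pvEStep g) none with
  | some e =>
    rw [he] at h
    simp only [Option.some.injEq] at h
    subst h
    rcases pv_eStep_some g keys none e he with hv | hv
    · exact Or.inl hv
    · exact absurd hv (by simp)
  | none =>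
    rw [he] at h
    simp only [] at h
    cases hv : keys.foldl (pvVStep g) none with
    | some v =>
      rw [hv] at h
      simp only [Option.some.injEq] at h
      subst h
      rw [pv_vStep_min] at hv
      have := List.mem_filter.1 (PySem.List.min?_mem hv)
      exact Or.inr (Or.inl this.2)
    | none =>
      rw [hv] at h
      simp only [] at h
      rw [pv_oStep_min g keys (pv_eStep_none g keys none he).2
        (by
          intro k hk
          rw [pv_vStep_min] at hv
          have hnil : keys.filter (fun k => PySem.Str.startswith (PySem.Str.lower k) (g ++ "-")) = [] :=
            (PySem.List.min?_eq_none_iff _ _).1 hv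
          by_contra hc
          have : k ∈ keys.filter (fun k => PySem.Str.startswith (PySem.Str.lower k) (g ++ "-")) := by
            refine List.mem_filter.2 ⟨hk, ?_⟩
            cases hx : PySem.Str.startswith (PySem.Str.lower k) (g ++ "-") with
            | false => exact absurd hx hc
            | true => rfl
          rw [hnil] at this
          exact absurd this (List.not_mem_nil))] at h
      have := List.mem_filter.1 (PySem.List.min?_mem h)
      exact Or.inr (Or.inr this.2)

-- a winner for "en" or "de" is never the empty string
theorem pv_scan_ne_empty_en (keys : List String) (l : String)
    (h : pvScanBest keys "en" = some l) : l ≠ "" := by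
  intro hl
  subst hl
  rcases pv_scan_some_cond keys "en" "" h with hc | hc | hc <;> revert hc <;> decide

theorem pv_scan_ne_empty_de (keys : List String) (l : String)
    (h : pvScanBest keys "de" = some l) : l ≠ "" := by
  intro hl
  subst hl
  rcases pv_scan_some_cond keys "de" "" h with hc | hc | hc <;> revert hc <;> decide

-- the two per-group attempts agree
theorem pv_tryGroup_eq_en (tracks : List (String × String)) (langs : List String) :
    pvTryGroup tracks langs "en" = pvTryGroupB tracks langs "en" := by
  unfold pvTryGroup pvTryGroupB
  rw [pv_bestLang_eq_scan langs "en" (by decide)]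
  cases h : pvScanBest langs "en" with
  | none => rfl
  | some l => simp [pv_scan_ne_empty_en langs l h]

theorem pv_tryGroup_eq_de (tracks : List (String × String)) (langs : List String) :
    pvTryGroup tracks langs "de" = pvTryGroupB tracks langs "de" := by
  unfold pvTryGroup pvTryGroupB
  rw [pv_bestLang_eq_scan langs "de" (by decide)]
  cases h : pvScanBest langs "de" with
  | none => rfl
  | some l => simp [pv_scan_ne_empty_de langs l h]

-- both programs build the same filtered language list
theorem pv_langs_eq (tracks : List (String × String)) :
    pvFilterLangKeys (tracks.map (fun t => t.1))
      = tracks.filterMap (fun t => if PySem.Str.lower t.1 == "live_chat" then none else some t.1) := by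
  unfold pvFilterLangKeys
  have h1 : (fun (out : List String) (k : String) =>
        if PySem.Str.lower k == "live_chat" then out else out ++ [k])
      = (fun out k => if (!(PySem.Str.lower k == "live_chat")) = true then out ++ [id k] else out) := by
    funext out k
    by_cases h : PySem.Str.lower k == "live_chat" <;> simp [h]
  rw [h1, PySem.List.foldl_append_if]
  induction tracks with
  | nil => rfl
  | cons t ts ih =>
    by_cases h : PySem.Str.lower t.1 = "live_chat" <;>
      simp [h] <;>
      simpa using ih

-- the fallback branches agree
theorem pv_fallback_eq (tracks : List (String × String)) :
    (if tracks ≠ [] then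
      match PySem.List.sorted tracks
          (fun t => toLex (decide (t.1 = ""), toLex (PySem.Str.lower t.1, t.2))) false with
      | t :: _ => ((some "other", some t.2) : Option String × Option String)
      | [] => (none, none)
    else (none, none))
      = (match PySem.List.min? tracks
            (fun t => toLex (decide (t.1 = ""), toLex (PySem.Str.lower t.1, t.2))) with
        | some t => ((some "other", some t.2) : Option String × Option String)
        | none => (none, none)) := by
  by_cases h : tracks = []
  · subst h; simp [PySem.List.min?]
  · simp only [h, ne_eq, not_false_iff, if_true]
    have := pv_sorted_head_min tracks
      (fun t => toLex (decide (t.1 = ""), toLex (PySem.Str.lower t.1, t.2)))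
    cases hs : PySem.List.sorted tracks
        (fun t => toLex (decide (t.1 = ""), toLex (PySem.Str.lower t.1, t.2))) false with
    | nil =>
      rw [hs] at this
      simp at this
      rw [← this]
    | cons t ts =>
      rw [hs] at this
      simp at this
      rw [← this]

-- ===== VERDICT (by name: the statement is the Claim_ definition above) =====
theorem ccc_pick_track_spec : Claim_equal_ccc_pick_track := by
  intro tracks _
  unfold Spec_ccc_pick_track ccc_pick_track ccc_pick_track_alt
  simp only [List.foldl_cons, List.foldl_nil]
  rw [pv_langs_eq, pv_tryGroup_eq_en, pv_tryGroup_eq_de]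
  cases h1 : pvTryGroupB tracks
      (tracks.filterMap (fun t => if PySem.Str.lower t.1 == "live_chat" then none else some t.1)) "en" with
  | some r => rfl
  | none =>
    simp only []
    cases h2 : pvTryGroupB tracks
        (tracks.filterMap (fun t => if PySem.Str.lower t.1 == "live_chat" then none else some t.1)) "de" with
    | some r => rfl
    | none => exact pv_fallback_eq tracks
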